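-- pv_equiv track=rewrite | github.com/Arsen1302/Code-copy-detector | TestData/solutions/problem_769_4_1.py | solution_769_4_3
-- ===== SOURCE A (Python) =====
-- from typing import List
--
-- def solution_769_4_3(nums: List[int]) -> int:
--     # try to make alternate less than left and right..
--
--     def solution_769_4_2(start): # returns cost
--         cost = 0
--         for i in range(start, len(nums), 2):
--             change = 0
--             # 1. make me smaller than LEFT adjacent
--             if i > 0 and nums[i-1] <= nums[i]:
--                 left_change = nums[i] - nums[i-1] + 1
--                 change = max(left_change, change)
--
--             # 2. do same for right neighbour
--             if i < len(nums)-1 and nums[i+1] <= nums[i]: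
--                 right_change = nums[i] - nums[i+1] + 1
--                 change = max(right_change, change)
--
--             cost += change
--         return cost
--
--     return min(solution_769_4_2(0), solution_769_4_2(1))
-- ===== SOURCE B (Python) =====
-- from typing import List
--
-- def solution_769_4_3(nums: List[int]) -> int:
--     # Index-free single scan over (value, right-neighbor) pairs: each element's
--     # fix cost is max(0, v - min(neighbors) + 1); a swap-pair accumulator routes
--     # costs to the two alternating parities without any parity test.
--     cur = oth = 0
--     prev = None
--     for v, r in zip(nums, nums[1:] + [None]):
--         nbs = [u for u in (prev, r) if u is not None]
--         c = max(0, v - min(nbs) + 1) if nbs else 0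
--         cur, oth = oth, cur + c
--         prev = v
--     return min(cur, oth)
-- ===== Notes on version B (the rewrite author's own statement) =====
-- stated objective: alternative
-- what changed: Replaces A's two index-strided parity passes (guarded left/right increment maxes) by a single index-free scan over zip(nums, shifted-rights) that computes each element's cost as max(0, v - min(neighbors) + 1) and distributes costs to the two parities with a swap-pair accumulator (no parity test, no indexing).
import Mathlib
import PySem

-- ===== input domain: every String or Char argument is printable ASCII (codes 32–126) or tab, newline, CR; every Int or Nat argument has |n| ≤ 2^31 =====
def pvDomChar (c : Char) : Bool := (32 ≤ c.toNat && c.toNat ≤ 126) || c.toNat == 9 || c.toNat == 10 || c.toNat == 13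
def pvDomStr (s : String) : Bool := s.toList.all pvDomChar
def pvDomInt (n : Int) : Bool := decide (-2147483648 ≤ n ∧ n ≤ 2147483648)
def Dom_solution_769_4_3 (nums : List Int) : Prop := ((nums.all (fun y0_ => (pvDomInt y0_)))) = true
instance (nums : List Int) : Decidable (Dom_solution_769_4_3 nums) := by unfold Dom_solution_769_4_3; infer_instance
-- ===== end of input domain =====

-- B replaces A's two index-strided parity passes by one index-free scan over
-- (value, right-neighbour) pairs with a min-of-neighbours cost and a swap-pair accumulator.

-- ===== PORT A =====
def solution_769_4_2 (nums : List Int) (start : Int) : Int :=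
  (PySem.List.pyRange start (PySem.List.len nums) 2).foldl
    (fun cost i =>
      let change : Int := 0
      let change := if i > 0 ∧ PySem.List.pyGetD nums (i-1) 0 ≤ PySem.List.pyGetD nums i 0 then
          max (PySem.List.pyGetD nums i 0 - PySem.List.pyGetD nums (i-1) 0 + 1) change else change
      let change := if i < PySem.List.len nums - 1 ∧ PySem.List.pyGetD nums (i+1) 0 ≤ PySem.List.pyGetD nums i 0 then
          max (PySem.List.pyGetD nums i 0 - PySem.List.pyGetD nums (i+1) 0 + 1) change else change
      cost + change) 0

def solution_769_4_3 (nums : List Int) : Int :=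
  min (solution_769_4_2 nums 0) (solution_769_4_2 nums 1)

-- ===== PORT B =====
def solution_769_4_3_alt (nums : List Int) : Int :=
  let st := (nums.zip ((nums.drop 1).map Option.some ++ [none])).foldl
    (fun (s : Int × Int × Option Int) (vr : Int × Option Int) =>
      let cur := s.1
      let oth := s.2.1
      let prev := s.2.2
      let v := vr.1
      let r := vr.2
      let nbs : List Int := (match prev with | some u => [u] | none => []) ++
                            (match r with | some u => [u] | none => [])
      let c : Int := if nbs ≠ [] then max 0 (v - ((PySem.List.min? nbs (fun x => x)).getD 0) + 1) else 0
      (oth, cur + c, some v))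
    ((0 : Int), (0 : Int), (none : Option Int))
  min st.1 st.2.1

-- ===== PRECONDITION & SPEC =====
def Spec_solution_769_4_3 (nums : List Int) (out : Int) : Prop := out = solution_769_4_3_alt nums
instance (nums : List Int) (out : Int) : Decidable (Spec_solution_769_4_3 nums out) := by unfold Spec_solution_769_4_3; infer_instance

-- ===== CLAIM (what is proved, stated in full; the proofs are below) =====
def Claim_equal_solution_769_4_3 : Prop := ∀ (nums : List Int), Dom_solution_769_4_3 nums → Spec_solution_769_4_3 nums (solution_769_4_3 nums)

-- ===== LEMMAS AND PROOFS =====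

-- the per-index fix cost, as A computes it (indexed form)
def pvChg (nums : List Int) (i : Int) : Int :=
  let c : Int := if i > 0 ∧ PySem.List.pyGetD nums (i-1) 0 ≤ PySem.List.pyGetD nums i 0 then
      PySem.List.pyGetD nums i 0 - PySem.List.pyGetD nums (i-1) 0 + 1 else 0
  if i < PySem.List.len nums - 1 ∧ PySem.List.pyGetD nums (i+1) 0 ≤ PySem.List.pyGetD nums i 0 then
      max c (PySem.List.pyGetD nums i 0 - PySem.List.pyGetD nums (i+1) 0 + 1) else c

-- B's per-element cost (neighbour-option form, exactly the port's expression)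
def pvCost (prev : Option Int) (v : Int) (r : Option Int) : Int :=
  let nbs : List Int := (match prev with | some u => [u] | none => []) ++
                        (match r with | some u => [u] | none => [])
  if nbs ≠ [] then max 0 (v - ((PySem.List.min? nbs (fun x => x)).getD 0) + 1) else 0

-- the even/odd parity cost sums of a suffix, computed structurally as B does
def pvEO : Option Int → List Int → Int × Int
  | _, [] => (0, 0)
  | p, v :: rest => (pvCost p v rest.head? + (pvEO (some v) rest).2, (pvEO (some v) rest).1)

-- A's per-index change equals pvChg
lemma chg_eq (nums : List Int) (i : Int) :
    (let change : Int := 0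
     let change := if i > 0 ∧ PySem.List.pyGetD nums (i-1) 0 ≤ PySem.List.pyGetD nums i 0 then
        max (PySem.List.pyGetD nums i 0 - PySem.List.pyGetD nums (i-1) 0 + 1) change else change
     if i < PySem.List.len nums - 1 ∧ PySem.List.pyGetD nums (i+1) 0 ≤ PySem.List.pyGetD nums i 0 then
        max (PySem.List.pyGetD nums i 0 - PySem.List.pyGetD nums (i+1) 0 + 1) change else change) = pvChg nums i := by
  simp only [pvChg, max_def]
  split_ifs <;> omega

-- step-2 range structure
lemma pyr2_nil (a b : Int) (h : b ≤ a) : PySem.List.pyRange a b 2 = [] := by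
  rw [PySem.List.pyRange_of_pos a b (by norm_num)]
  rw [if_neg (by omega)]
  simp

lemma pyr2_cons (a b : Int) (h : a < b) :
    PySem.List.pyRange a b 2 = a :: PySem.List.pyRange (a+2) b 2 := by
  rw [PySem.List.pyRange_of_pos a b (by norm_num), PySem.List.pyRange_of_pos (a+2) b (by norm_num)]
  rw [if_pos h]
  have hcnt : ((b - a + 2 - 1) / 2).toNat = (if a + 2 < b then ((b - (a+2) + 2 - 1) / 2).toNat else 0) + 1 := by
    split_ifs <;> omega
  rw [hcnt, List.range_succ_eq_map]
  simp [List.map_map, Function.comp]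
  intro k _
  omega

-- A's strided pass is the parity-strided sum of the per-index costs
lemma costA_eq (nums : List Int) (s : Int) :
    solution_769_4_2 nums s = ((PySem.List.pyRange s (PySem.List.len nums) 2).map (pvChg nums)).sum := by
  unfold solution_769_4_2
  have hfun : (fun (cost i : Int) =>
      let change : Int := 0
      let change := if i > 0 ∧ PySem.List.pyGetD nums (i-1) 0 ≤ PySem.List.pyGetD nums i 0 then
          max (PySem.List.pyGetD nums i 0 - PySem.List.pyGetD nums (i-1) 0 + 1) change else change
      let change := if i < PySem.List.len nums - 1 ∧ PySem.List.pyGetD nums (i+1) 0 ≤ PySem.List.pyGetD nums i 0 then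
          max (PySem.List.pyGetD nums i 0 - PySem.List.pyGetD nums (i+1) 0 + 1) change else change
      cost + change) = (fun cost i => cost + pvChg nums i) := by
    funext cost i
    simp only
    rw [chg_eq]
  rw [hfun, PySem.List.foldl_add]
  ring

-- B's per-element cost coincides with A's indexed cost at index k of nums
lemma cost_eq_chg (nums : List Int) (k : Nat) (hk : k < nums.length)
    (p : Option Int)
    (hp : (k = 0 ∧ p = none) ∨ (∃ j : Nat, k = j + 1 ∧ p = some (nums.getD j 0))) :
    pvCost p (nums.getD k 0) ((nums.drop (k+1)).head?) = pvChg nums (k : Int) := by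
  have hhead : (nums.drop (k+1)).head? = if _h : k + 1 < nums.length then some (nums.getD (k+1) 0) else none := by
    split_ifs with h
    · rw [List.getD_eq_getElem _ _ h]
      rw [List.head?_eq_getElem?, List.getElem?_drop]
      simp
    · have : nums.drop (k+1) = [] := List.drop_eq_nil_of_le (by omega)
      simp [this]
  have hgk : PySem.List.pyGetD nums (k : Int) 0 = nums.getD k 0 := PySem.List.pyGetD_natCast nums k 0
  have hgr : k + 1 < nums.length → PySem.List.pyGetD nums ((k : Int) + 1) 0 = nums.getD (k+1) 0 := by
    intro _
    rw [show ((k : Int) + 1) = ((k+1 : Nat) : Int) by push_cast; ring, PySem.List.pyGetD_natCast]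
  rcases hp with ⟨hk0, hpn⟩ | ⟨j, hkj, hpj⟩
  · subst hk0; subst hpn
    by_cases h1 : 0 + 1 < nums.length
    · rw [hhead, dif_pos h1]
      have hgr' := hgr h1
      simp only [pvCost, pvChg, List.nil_append, PySem.List.len_eq]
      rw [if_pos (by simp), PySem.List.min?_id_cons]
      simp only [List.foldl, Option.getD_some, max_def]
      split_ifs <;> omega
    · rw [hhead, dif_neg h1]
      simp only [pvCost, pvChg, List.append_nil, PySem.List.len_eq]
      rw [if_neg (by simp)]
      simp only [max_def]
      split_ifs <;> omega
  · subst hkj; subst hpj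
    have hgl : PySem.List.pyGetD nums ((↑(j+1) : Int) - 1) 0 = nums.getD j 0 := by
      rw [show ((↑(j+1) : Int) - 1) = ((j : Nat) : Int) by push_cast; ring, PySem.List.pyGetD_natCast]
    by_cases h1 : j + 2 < nums.length
    · rw [hhead, dif_pos (by omega)]
      have hgr' := hgr (by omega)
      simp only [pvCost, pvChg, List.cons_append, List.nil_append, PySem.List.len_eq]
      rw [if_pos (by simp), PySem.List.min?_id_cons]
      simp only [List.foldl, Option.getD_some, max_def, min_def]
      split_ifs <;> omega
    · rw [hhead, dif_neg (by omega)]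
      simp only [pvCost, pvChg, List.append_nil, PySem.List.len_eq]
      rw [if_pos (by simp), PySem.List.min?_id_cons]
      simp only [List.foldl, Option.getD_some, max_def]
      split_ifs <;> omega

-- pvEO over the suffix at k equals the pair of strided sums starting at k and k+1
lemma eo_eq_sums (nums : List Int) : ∀ (suf : List Int) (k : Nat) (p : Option Int),
    nums.drop k = suf →
    ((k = 0 ∧ p = none) ∨ (∃ j : Nat, k = j + 1 ∧ p = some (nums.getD j 0))) →
    pvEO p suf = (((PySem.List.pyRange (k : Int) (PySem.List.len nums) 2).map (pvChg nums)).sum,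
                  ((PySem.List.pyRange ((k : Int)+1) (PySem.List.len nums) 2).map (pvChg nums)).sum) := by
  intro suf
  induction suf with
  | nil =>
    intro k p hdrop _
    have hlen : nums.length ≤ k := by
      have := List.drop_eq_nil_iff.mp hdrop
      omega
    rw [pyr2_nil _ _ (by simp [PySem.List.len_eq]; omega), pyr2_nil _ _ (by simp [PySem.List.len_eq]; omega)]
    simp [pvEO]
  | cons v rest ih =>
    intro k p hdrop hp
    have hk : k < nums.length := by
      by_contra h
      rw [List.drop_eq_nil_of_le (by omega)] at hdrop
      simp at hdrop
    have hv : nums.getD k 0 = v := by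
      have h2 : nums[k]? = some v := by
        rw [← List.head?_drop, hdrop]
        rfl
      simp [List.getD_eq_getElem?_getD, h2]
    have hdrop' : nums.drop (k+1) = rest := by
      rw [← List.tail_drop, hdrop, List.tail_cons]
    have hrec := ih (k+1) (some v) hdrop' (Or.inr ⟨k, rfl, by rw [hv]⟩)
    have hcost : pvCost p v rest.head? = pvChg nums (k : Int) := by
      have := cost_eq_chg nums k hk p hp
      rw [hv] at this
      rw [← this, hdrop']
    simp only [pvEO, hrec, hcost]
    have hsplit : ((PySem.List.pyRange (k : Int) (PySem.List.len nums) 2).map (pvChg nums)).sum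
        = pvChg nums (k : Int) + ((PySem.List.pyRange ((k : Int)+2) (PySem.List.len nums) 2).map (pvChg nums)).sum := by
      rw [pyr2_cons _ _ (by simp [PySem.List.len_eq]; omega)]
      simp
    rw [Prod.mk.injEq]
    constructor
    · rw [hsplit, show ((k:Int)+2) = ((k:Int)+1+1) by ring]
      push_cast
      try ring_nf
    · push_cast
      try ring_nf

-- the zip list B folds over, structurally
lemma zl_cons (v : Int) (rest : List Int) :
    (v :: rest).zip (((v :: rest).drop 1).map Option.some ++ [none]) =
    (v, rest.head?) :: rest.zip ((rest.drop 1).map Option.some ++ [none]) := by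
  cases rest <;> rfl

-- B's swap-pair fold computes pvEO (up to a parity swap that min ignores)
lemma fold_eo (suf : List Int) : ∀ (p : Option Int) (cur oth : Int),
    ∃ q : Option Int,
    (suf.zip ((suf.drop 1).map Option.some ++ [none])).foldl
      (fun (s : Int × Int × Option Int) (vr : Int × Option Int) =>
        (s.2.1, s.1 + pvCost s.2.2 vr.1 vr.2, some vr.1)) (cur, oth, p)
    = if suf.length % 2 = 0
      then (cur + (pvEO p suf).1, oth + (pvEO p suf).2, q)
      else (oth + (pvEO p suf).2, cur + (pvEO p suf).1, q) := by
  induction suf with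
  | nil =>
    intro p cur oth
    exact ⟨p, by simp [pvEO]⟩
  | cons v rest ih =>
    intro p cur oth
    rw [zl_cons, List.foldl_cons]
    obtain ⟨q, hq⟩ := ih (some v) oth (cur + pvCost p v rest.head?)
    refine ⟨q, ?_⟩
    show List.foldl (fun (s : Int × Int × Option Int) (vr : Int × Option Int) =>
        (s.2.1, s.1 + pvCost s.2.2 vr.1 vr.2, some vr.1))
        (oth, cur + pvCost p v rest.head?, some v)
        (rest.zip (List.map some (List.drop 1 rest) ++ [none])) = _
    rw [hq]
    simp only [pvEO, List.length_cons]
    rcases Nat.even_or_odd rest.length with ⟨m, hm⟩ | ⟨m, hm⟩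
    · rw [if_pos (by omega), if_neg (by omega)]
      rw [Prod.mk.injEq, Prod.mk.injEq]
      exact ⟨by ring, by ring, rfl⟩
    · rw [if_neg (by omega), if_pos (by omega)]
      rw [Prod.mk.injEq, Prod.mk.injEq]
      exact ⟨by ring, by ring, rfl⟩

-- ===== VERDICT (by name: the statement is the Claim_ definition above) =====
theorem solution_769_4_3_spec : Claim_equal_solution_769_4_3 := by
  intro nums _
  unfold Spec_solution_769_4_3 solution_769_4_3 solution_769_4_3_alt
  simp only
  have hstep : (fun (s : Int × Int × Option Int) (vr : Int × Option Int) =>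
      let cur := s.1
      let oth := s.2.1
      let prev := s.2.2
      let v := vr.1
      let r := vr.2
      let nbs : List Int := (match prev with | some u => [u] | none => []) ++
                            (match r with | some u => [u] | none => [])
      let c : Int := if nbs ≠ [] then max 0 (v - ((PySem.List.min? nbs (fun x => x)).getD 0) + 1) else 0
      (oth, cur + c, some v))
      = (fun (s : Int × Int × Option Int) (vr : Int × Option Int) =>
        (s.2.1, s.1 + pvCost s.2.2 vr.1 vr.2, some vr.1)) := by
    funext s vr
    rfl
  rw [hstep]
  obtain ⟨q, hq⟩ := fold_eo nums none 0 0
  rw [hq]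
  have heo := eo_eq_sums nums nums 0 none rfl (Or.inl ⟨rfl, rfl⟩)
  rw [costA_eq, costA_eq, heo]
  split_ifs <;> simp [min_comm]
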